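-- pv_equiv track=rewrite | github.com/ValentinSiegert/AdventOfCode | 2021/day17.py | f
-- ===== SOURCE A (Python) =====
-- def f(s, x, y):
--     if s <= 0:
--         return tuple([0, 0])
--     else:
--         result_x = 0
--         if x > 0:
--             i_max = s if s < x else x
--             for i in range(1, i_max + 1):
--                 result_x += x-i+1
--         elif x < 0:
--             i_max = s if s <= abs(x) else x
--             for i in range(1, i_max + 1):
--                 result_x += x+i-1
--         result_y = 0
--         for i in range(1, s + 1):
--             result_y += y - i + 1
--     return tuple([result_x, result_y])
-- ===== SOURCE B (Python) =====
-- def f(s, x, y):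
--     # Closed-form arithmetic-series sums (O(1)) instead of O(s) loops.
--     if s <= 0:
--         return (0, 0)
--     n = min(s, abs(x))               # number of steps before horizontal drag stops the probe
--     dx = n * abs(x) - n * (n - 1) // 2
--     return (dx if x >= 0 else -dx, s * y - s * (s - 1) // 2)
-- ===== Notes on version B (the rewrite author's own statement) =====
-- stated objective: faster
-- what changed: Replaces the per-step accumulation loops with closed-form arithmetic-series sums (capped by drag via min(s, abs(x))), evaluating the position in O(1).
-- intended difference: For x < 0 with s > abs(x) (s > 0), A's 'else x' (instead of abs(x)) makes its x-loop empty so it returns x-position 0, while B returns the full negative drag displacement -(abs(x)*(abs(x)+1)/2), the physically intended position where the probe stops. — e.g. on f(3, -2, 5): A returns [0, 12], B returns [-3, 12]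
import Mathlib
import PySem

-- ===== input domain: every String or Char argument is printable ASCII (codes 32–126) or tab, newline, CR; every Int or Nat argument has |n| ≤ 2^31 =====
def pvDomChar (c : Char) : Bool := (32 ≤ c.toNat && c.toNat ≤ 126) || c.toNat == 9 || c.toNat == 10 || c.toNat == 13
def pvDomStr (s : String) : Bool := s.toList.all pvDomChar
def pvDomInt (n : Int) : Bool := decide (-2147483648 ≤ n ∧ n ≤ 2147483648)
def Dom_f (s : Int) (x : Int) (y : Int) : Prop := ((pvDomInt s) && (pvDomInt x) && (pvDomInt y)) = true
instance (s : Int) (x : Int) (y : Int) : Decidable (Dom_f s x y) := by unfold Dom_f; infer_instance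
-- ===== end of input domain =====

-- B computes the projectile position by closed-form arithmetic-series sums (O(1)) instead of A's O(s) loops;
-- on x < 0 with s > |x| A's empty loop returns x-position 0 while B returns the intended capped drag displacement (see D_f).

-- ===== PORT A =====
def f (s : Int) (x : Int) (y : Int) : List Int :=
  if s ≤ 0 then [0, 0]
  else
    let resultX : Int :=
      if x > 0 then
        let iMax := if s < x then s else x
        (PySem.List.pyRange 1 (iMax + 1) 1).foldl (fun a i => a + (x - i + 1)) 0
      else if x < 0 then
        let iMax := if s ≤ |x| then s else x
        (PySem.List.pyRange 1 (iMax + 1) 1).foldl (fun a i => a + (x + i - 1)) 0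
      else 0
    let resultY : Int :=
      (PySem.List.pyRange 1 (s + 1) 1).foldl (fun a i => a + (y - i + 1)) 0
    [resultX, resultY]

-- ===== PORT B =====
def f_alt (s : Int) (x : Int) (y : Int) : List Int :=
  if s ≤ 0 then [0, 0]
  else
    let n := min s |x|
    let dx := n * |x| - PySem.Int.floordiv (n * (n - 1)) 2
    [if x ≥ 0 then dx else -dx, s * y - PySem.Int.floordiv (s * (s - 1)) 2]

-- ===== PRECONDITION & SPEC =====
-- For x < 0 with s > |x| (and s > 0), A's 'else x' (instead of abs(x)) makes its x-loop empty so A returns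
-- x-position 0, while B returns the intended capped drag displacement -(|x|*(|x|+1)/2).
def D_f (s : Int) (x : Int) (y : Int) : Prop := 0 < s ∧ x < 0 ∧ -x < s
instance (s : Int) (x : Int) (y : Int) : Decidable (D_f s x y) := by unfold D_f; infer_instance

def Spec_f (s : Int) (x : Int) (y : Int) (out : List Int) : Prop := ¬ D_f s x y → out = f_alt s x y
instance (s : Int) (x : Int) (y : Int) (out : List Int) : Decidable (Spec_f s x y out) := by unfold Spec_f; infer_instance

def pvDiffWitness_f : Int × Int × Int := (3, -2, 5)
def pvDiffWitnessOut_f : (List Int) × (List Int) := ([0, 12], [-3, 12])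

-- ===== CLAIM (what is proved, stated in full; the proofs are below) =====
def Claim_unchanged_f : Prop := ∀ (s : Int) (x : Int) (y : Int), Dom_f s x y → Spec_f s x y (f s x y)
def Claim_changed_f : Prop := Dom_f (pvDiffWitness_f.1) (pvDiffWitness_f.2.1) (pvDiffWitness_f.2.2) ∧ D_f (pvDiffWitness_f.1) (pvDiffWitness_f.2.1) (pvDiffWitness_f.2.2) ∧ f (pvDiffWitness_f.1) (pvDiffWitness_f.2.1) (pvDiffWitness_f.2.2) = pvDiffWitnessOut_f.1 ∧ f_alt (pvDiffWitness_f.1) (pvDiffWitness_f.2.1) (pvDiffWitness_f.2.2) = pvDiffWitnessOut_f.2 ∧ pvDiffWitnessOut_f.1 ≠ pvDiffWitnessOut_f.2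
def Claim_exact_f : Prop := ∀ (s : Int) (x : Int) (y : Int), Dom_f s x y → D_f s x y → f s x y ≠ f_alt s x y

-- ===== LEMMAS AND PROOFS =====

-- doubled sum of (c - i + 1) for i = 1..m
lemma twice_sum_dec (c : Int) : ∀ (m : Nat),
    2 * (PySem.List.pyRange 1 ((m : Int) + 1) 1).foldl (fun a i => a + (c - i + 1)) 0
      = (m : Int) * (2 * c - (m : Int) + 1) := by
  intro m
  induction m with
  | zero => simp [PySem.List.pyRange_one_eq_nil]
  | succ k ih =>
    have h : (1 : Int) ≤ (k : Int) + 1 := by omega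
    have hr : PySem.List.pyRange 1 (((k : Int) + 1) + 1) 1
        = PySem.List.pyRange 1 ((k : Int) + 1) 1 ++ [(k : Int) + 1] :=
      PySem.List.pyRange_one_succ_right h
    push_cast
    rw [hr, List.foldl_append]
    simp only [List.foldl_cons, List.foldl_nil]
    push_cast at ih
    nlinarith [ih]

-- doubled sum of (c + i - 1) for i = 1..m
lemma twice_sum_inc (c : Int) : ∀ (m : Nat),
    2 * (PySem.List.pyRange 1 ((m : Int) + 1) 1).foldl (fun a i => a + (c + i - 1)) 0
      = (m : Int) * (2 * c + (m : Int) - 1) := by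
  intro m
  induction m with
  | zero => simp [PySem.List.pyRange_one_eq_nil]
  | succ k ih =>
    have h : (1 : Int) ≤ (k : Int) + 1 := by omega
    have hr : PySem.List.pyRange 1 (((k : Int) + 1) + 1) 1
        = PySem.List.pyRange 1 ((k : Int) + 1) 1 ++ [(k : Int) + 1] :=
      PySem.List.pyRange_one_succ_right h
    push_cast
    rw [hr, List.foldl_append]
    simp only [List.foldl_cons, List.foldl_nil]
    push_cast at ih
    nlinarith [ih]

-- floordiv of an even product: 2 * (n*(n-1) // 2) = n*(n-1)
lemma half_prod (n : Int) : 2 * PySem.Int.floordiv (n * (n - 1)) 2 = n * (n - 1) := by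
  have hdvd : (2 : Int) ∣ n * (n - 1) := by
    rcases Int.even_or_odd n with he | ho
    · exact Dvd.dvd.mul_right he.two_dvd _
    · obtain ⟨k, hk⟩ := ho
      exact Dvd.dvd.mul_left ⟨k, by omega⟩ _
  rw [PySem.Int.floordiv_eq_ediv_of_pos (by norm_num)]
  exact Int.mul_ediv_cancel' hdvd

-- Int forms of the sum lemmas, for 0 ≤ m
lemma sum_dec_int (c m : Int) (hm : 0 ≤ m) :
    2 * (PySem.List.pyRange 1 (m + 1) 1).foldl (fun a i => a + (c - i + 1)) 0
      = m * (2 * c - m + 1) := by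
  have := twice_sum_dec c m.toNat
  rwa [Int.toNat_of_nonneg hm] at this

lemma sum_inc_int (c m : Int) (hm : 0 ≤ m) :
    2 * (PySem.List.pyRange 1 (m + 1) 1).foldl (fun a i => a + (c + i - 1)) 0
      = m * (2 * c + m - 1) := by
  have := twice_sum_inc c m.toNat
  rwa [Int.toNat_of_nonneg hm] at this

-- ===== VERDICT (by name: the statement is the Claim_ definition above) =====
theorem f_spec : Claim_unchanged_f := by
  intro s x y _ hnd
  simp only [f, f_alt]
  by_cases hs : s ≤ 0
  · simp [hs]
  · simp only [if_neg hs]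
    have hs1 : (0 : Int) < s := by omega
    -- y-component
    have hy := sum_dec_int y s (by omega)
    have h2y : 2 * PySem.Int.floordiv (s * (s - 1)) 2 = s * (s - 1) := half_prod s
    have hyeq : (PySem.List.pyRange 1 (s + 1) 1).foldl (fun a i => a + (y - i + 1)) 0
        = s * y - PySem.Int.floordiv (s * (s - 1)) 2 := by nlinarith [hy, h2y]
    -- x-component
    rcases lt_trichotomy x 0 with hx | hx | hx
    · -- x < 0; ¬D_ forces s ≤ -x
      have hsx : s ≤ -x := by
        by_contra hc
        exact hnd ⟨hs1, hx, by omega⟩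
      have habs : |x| = -x := abs_of_neg hx
      have hmin : min s |x| = s := by rw [habs]; omega
      have hcond : s ≤ |x| := by rw [habs]; exact hsx
      simp only [if_neg (by omega : ¬ x > 0), if_pos hx, if_pos hcond,
        if_neg (by omega : ¬ x ≥ 0), hmin, hyeq]
      have hxsum := sum_inc_int x s (by omega)
      have h2s : 2 * PySem.Int.floordiv (s * (s - 1)) 2 = s * (s - 1) := half_prod s
      congr 1
      rw [habs]
      nlinarith [hxsum, h2s]
    · -- x = 0: both x-components are 0
      subst hx
      have h0 : min s (0:Int) = 0 := by omega
      simp [hyeq, PySem.Int.floordiv, h0]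
    · -- x > 0
      have habs : |x| = x := abs_of_pos hx
      have hi : (if s < x then s else x) = min s x := by
        by_cases h : s < x <;> simp [h, min_def] <;> omega
      have hmin : min s |x| = min s x := by rw [habs]
      set n := min s x with hn
      have hn0 : 0 ≤ n := by rw [hn]; positivity
      have hxsum := sum_dec_int x n hn0
      have h2n : 2 * PySem.Int.floordiv (n * (n - 1)) 2 = n * (n - 1) := half_prod n
      simp only [if_pos hx, if_pos (by omega : x ≥ 0), hi, hmin, hyeq]
      congr 1
      nlinarith [hxsum, h2n]

theorem f_changed : Claim_changed_f := by unfold Claim_changed_f; decide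

theorem f_tight : Claim_exact_f := by
  intro s x y _ hd heq
  obtain ⟨hs, hx, hsx⟩ := hd
  simp only [f, f_alt, if_neg (by omega : ¬ s ≤ 0)] at heq
  have habs : |x| = -x := abs_of_neg hx
  have hempty : PySem.List.pyRange 1 (x + 1) 1 = [] :=
    PySem.List.pyRange_one_eq_nil (by omega)
  have hcond : ¬ s ≤ |x| := by rw [habs]; omega
  simp only [if_neg (by omega : ¬ x > 0), if_pos hx, if_neg hcond, hempty,
    List.foldl_nil, if_neg (by omega : ¬ x ≥ 0)] at heq
  have hmin : min s |x| = -x := by rw [habs]; omega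
  rw [hmin] at heq
  have hhead := List.head_eq_of_cons_eq heq
  have h2 : 2 * PySem.Int.floordiv (-x * (-x - 1)) 2 = -x * (-x - 1) := half_prod (-x)
  have : (0:Int) = -(-x * |x| - PySem.Int.floordiv (-x * (-x - 1)) 2) := hhead
  rw [habs] at this
  nlinarith [this, h2]
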